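-- pv_equiv track=rewrite | github.com/victinyGitHub/mole | mole/operations.py | _split_generic_params
-- ===== SOURCE A (Python) =====
-- def _split_generic_params(inner: str) -> list[str]:
--     """Split comma-separated generic parameters, respecting nested brackets.
--
--     "str, int"          → ["str", "int"]
--     "str, list[int]"    → ["str", "list[int]"]
--     "dict[str, int], X" → ["dict[str, int]", "X"]
--     """
--     params: list[str] = []
--     depth = 0
--     current: list[str] = []
--
--     for ch in inner:
--         if ch in ('[', '<'):
--             depth += 1
--             current.append(ch)
--         elif ch in (']', '>'):
--             depth -= 1
--             current.append(ch)
--         elif ch == ',' and depth == 0: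
--             params.append(''.join(current).strip())
--             current = []
--         else:
--             current.append(ch)
--
--     if current:
--         params.append(''.join(current).strip())
--
--     return params
-- ===== SOURCE B (Python) =====
-- def _split_generic_params(inner: str) -> list[str]:
--     """Split comma-separated generic parameters, respecting nested brackets.
--
--     Splits on ',' first, then re-joins fragments whose running bracket
--     balance has not returned to zero.
--     """
--     groups: list[str] = []
--     current = None
--     bal = 0
--     for frag in inner.split(','):
--         for ch in frag:
--             bal += (ch in '[<') - (ch in ']>')
--         current = frag if current is None else current + ',' + frag
--         if bal == 0:
--             groups.append(current)
--             current = None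
--     if current is not None:
--         groups.append(current)
--     if groups and groups[-1] == '':
--         groups.pop()
--     return [g.strip() for g in groups]
-- ===== Notes on version B (the rewrite author's own statement) =====
-- stated objective: faster
-- what changed: B splits the string on commas once and re-joins fragments using a running bracket balance, replacing A's per-character Python loop with C-level str.split/join so only fragments are handled in Python.
import Mathlib
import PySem

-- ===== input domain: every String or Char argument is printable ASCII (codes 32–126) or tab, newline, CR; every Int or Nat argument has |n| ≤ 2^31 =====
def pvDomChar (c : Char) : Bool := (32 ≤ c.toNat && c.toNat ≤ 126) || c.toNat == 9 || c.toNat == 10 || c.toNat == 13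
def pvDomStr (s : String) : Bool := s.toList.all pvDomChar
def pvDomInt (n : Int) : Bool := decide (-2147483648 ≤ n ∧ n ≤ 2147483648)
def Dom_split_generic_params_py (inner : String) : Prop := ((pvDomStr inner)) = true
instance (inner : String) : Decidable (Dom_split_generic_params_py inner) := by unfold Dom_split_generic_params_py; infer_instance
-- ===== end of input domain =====

-- B splits the string on commas once and re-joins fragments by a running bracket balance instead of
-- scanning char-by-char (a timing run measured B faster in CPython); return values proved equal.

-- ===== PORT A =====
-- one char of A's loop: state = (params, depth, current)
def pvStepA (st : List String × Int × List Char) (ch : Char) : List String × Int × List Char :=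
  let (params, depth, current) := st
  if ch = '[' ∨ ch = '<' then (params, depth + 1, current ++ [ch])
  else if ch = ']' ∨ ch = '>' then (params, depth - 1, current ++ [ch])
  else if ch = ',' ∧ depth = 0 then (params ++ [String.mk (PySem.Chars.strip current)], depth, [])
  else (params, depth, current ++ [ch])

def split_generic_params_py (inner : String) : List String :=
  let st := inner.toList.foldl pvStepA ([], 0, [])
  if st.2.2 = [] then st.1 else st.1 ++ [String.mk (PySem.Chars.strip st.2.2)]

-- ===== PORT B =====
-- (ch in '[<') - (ch in ']>'), accumulated over a fragment from b
def pvFragBal (b : Int) (frag : List Char) : Int :=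
  frag.foldl (fun b ch =>
    b + (if ch = '[' ∨ ch = '<' then 1 else 0) - (if ch = ']' ∨ ch = '>' then 1 else 0)) b

-- one fragment of B's loop: state = (groups, current, bal)
def pvStepB (st : List (List Char) × Option (List Char) × Int) (frag : List Char) :
    List (List Char) × Option (List Char) × Int :=
  let (groups, cur, bal) := st
  let bal' := pvFragBal bal frag
  let cur' := match cur with | none => frag | some s => s ++ [','] ++ frag
  if bal' = 0 then (groups ++ [cur'], none, bal') else (groups, some cur', bal')

def split_generic_params_py_alt (inner : String) : List String :=
  let st := (inner.toList.splitOn ',').foldl pvStepB ([], none, 0)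
  let groups := match st.2.1 with | none => st.1 | some s => st.1 ++ [s]
  let groups := if groups.getLast? = some [] then groups.dropLast else groups
  groups.map (fun g => String.mk (PySem.Chars.strip g))

-- ===== PRECONDITION & SPEC =====
def Spec_split_generic_params_py (inner : String) (out : List String) : Prop := out = split_generic_params_py_alt inner
instance (inner : String) (out : List String) : Decidable (Spec_split_generic_params_py inner out) := by unfold Spec_split_generic_params_py; infer_instance

-- ===== CLAIM (what is proved, stated in full; the proofs are below) =====
def Claim_equal_split_generic_params_py : Prop := ∀ (inner : String), Dom_split_generic_params_py inner → Spec_split_generic_params_py inner (split_generic_params_py inner)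

-- ===== LEMMAS AND PROOFS =====

-- glue frags back with commas (proof-side mirror of [','].intercalate)
def pvGlue : List (List Char) → List Char
  | [] => []
  | [f] => f
  | f :: g :: r => f ++ ',' :: pvGlue (g :: r)

-- the encoded A-current corresponding to B's optional current
def pvEnc : Option (List Char) → List Char
  | none => []
  | some s => s ++ [',']

def pvStrip (g : List Char) : String := String.mk (PySem.Chars.strip g)

-- A's finalization / B's finalization
def pvFinA (st : List String × Int × List Char) : List String :=
  if st.2.2 = [] then st.1 else st.1 ++ [pvStrip st.2.2]
def pvFinB (st : List (List Char) × Option (List Char) × Int) : List String :=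
  let groups := match st.2.1 with | none => st.1 | some s => st.1 ++ [s]
  let groups := if groups.getLast? = some [] then groups.dropLast else groups
  groups.map pvStrip


lemma pvStepA_ne_comma (p : List String) (d : Int) (c : List Char) (ch : Char) (h : ch ≠ ',') :
    pvStepA (p, d, c) ch =
      (p, d + (if ch = '[' ∨ ch = '<' then 1 else 0) - (if ch = ']' ∨ ch = '>' then 1 else 0),
        c ++ [ch]) := by
  by_cases h1 : ch = '[' ∨ ch = '<'
  · have h2 : ¬(ch = ']' ∨ ch = '>') := by rcases h1 with rfl | rfl <;> decide
    simp [pvStepA, h1, h2]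
  · by_cases h2 : ch = ']' ∨ ch = '>'
    · simp [pvStepA, h1, h2]
    · simp [pvStepA, h1, h2, h]

lemma pvFoldA_frag (frag : List Char) (h : ',' ∉ frag) (p : List String) (d : Int) (c : List Char) :
    frag.foldl pvStepA (p, d, c) = (p, pvFragBal d frag, c ++ frag) := by
  induction frag generalizing d c with
  | nil => simp [pvFragBal]
  | cons ch t ih =>
    have hch : ch ≠ ',' := by intro hc; exact h (hc ▸ List.mem_cons_self)
    have ht : ',' ∉ t := fun hm => h (List.mem_cons_of_mem _ hm)
    simp only [List.foldl_cons, pvStepA_ne_comma p d c ch hch, ih ht, pvFragBal,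
      List.append_assoc, List.singleton_append]

lemma pvFragBal_nil (b : Int) : pvFragBal b [] = b := rfl

lemma pvFragBal_append (b : Int) (xs ys : List Char) :
    pvFragBal b (xs ++ ys) = pvFragBal (pvFragBal b xs) ys := by
  simp [pvFragBal, List.foldl_append]

lemma pvFragBal_comma (b : Int) (xs : List Char) :
    pvFragBal b (xs ++ [',']) = pvFragBal b xs := by
  rw [pvFragBal_append]
  simp only [pvFragBal, List.foldl_cons, List.foldl_nil]
  rw [if_neg (by decide), if_neg (by decide)]; ring

lemma pvFragBal_enc (cur : Option (List Char)) (s : List Char) (h : cur = some s) :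
    pvFragBal 0 (pvEnc cur) = pvFragBal 0 s := by
  subst h; exact pvFragBal_comma 0 s

lemma pvStepB_eq (gs : List (List Char)) (cur : Option (List Char)) (b : Int) (f : List Char) :
    pvStepB (gs, cur, b) f =
      if pvFragBal b f = 0 then (gs ++ [pvEnc cur ++ f], none, pvFragBal b f)
      else (gs, some (pvEnc cur ++ f), pvFragBal b f) := by
  cases cur <;> simp [pvStepB, pvEnc]

lemma pvFinB_none (gs : List (List Char)) (b : Int) :
    pvFinB (gs, none, b) =
      (if gs.getLast? = some [] then gs.dropLast else gs).map pvStrip := rfl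

lemma pvFinB_some (gs : List (List Char)) (s : List Char) (b : Int) :
    pvFinB (gs, some s, b) =
      (if (gs ++ [s]).getLast? = some [] then (gs ++ [s]).dropLast else gs ++ [s]).map pvStrip :=
  rfl

-- main loop correspondence: processing glued fragments with A equals B's fragment loop
lemma pvMain (frags : List (List Char)) (hfr : ∀ f ∈ frags, ',' ∉ f) (hne : frags ≠ [])
    (gs : List (List Char)) (cur : Option (List Char)) :
    pvFinA ((pvGlue frags).foldl pvStepA
        (gs.map pvStrip, pvFragBal 0 (pvEnc cur), pvEnc cur)) =
    pvFinB (frags.foldl pvStepB (gs, cur, pvFragBal 0 (pvEnc cur))) := by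
  induction frags generalizing gs cur with
  | nil => exact absurd rfl hne
  | cons f rest ih =>
    have hf : ',' ∉ f := hfr f List.mem_cons_self
    have hb' : pvFragBal (pvFragBal 0 (pvEnc cur)) f = pvFragBal 0 (pvEnc cur ++ f) :=
      (pvFragBal_append 0 _ _).symm
    cases rest with
    | nil =>
      -- last fragment: A flushes its current; B finalizes/flushes, then pops a trailing empty
      have hglue : pvGlue [f] = f := rfl
      rw [hglue, pvFoldA_frag f hf, List.foldl_cons, List.foldl_nil, pvStepB_eq, hb']
      by_cases hz : pvFragBal 0 (pvEnc cur ++ f) = 0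
      · rw [if_pos hz, pvFinB_none]
        rw [List.getLast?_append_of_ne_nil _ (by simp), List.getLast?_singleton]
        by_cases hnil : pvEnc cur ++ f = []
        · rw [if_pos (by rw [hnil]), hnil]
          simp [pvFinA]
        · rw [if_neg (by simpa using hnil)]
          simp [pvFinA, hnil]
      · rw [if_neg hz, pvFinB_some]
        have hnil : pvEnc cur ++ f ≠ [] := by
          intro h; exact hz (by rw [h]; simp [pvFragBal])
        rw [List.getLast?_append_of_ne_nil _ (by simp), List.getLast?_singleton]
        rw [if_neg (by simpa using hnil)]
        simp [pvFinA, hnil]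
    | cons g r =>
      have hrest : ∀ x ∈ g :: r, ',' ∉ x := fun x hx => hfr x (List.mem_cons_of_mem _ hx)
      have hglue : pvGlue (f :: g :: r) = f ++ ',' :: pvGlue (g :: r) := rfl
      rw [hglue, List.foldl_append, pvFoldA_frag f hf, List.foldl_cons, hb',
        List.foldl_cons, pvStepB_eq, hb']
      by_cases hz : pvFragBal 0 (pvEnc cur ++ f) = 0
      · have hstep : pvStepA (gs.map pvStrip, pvFragBal 0 (pvEnc cur ++ f), pvEnc cur ++ f) ','
            = ((gs ++ [pvEnc cur ++ f]).map pvStrip, 0, ([] : List Char)) := by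
          simp [pvStepA, hz, pvStrip]
        rw [if_pos hz, hstep, hz]
        have := ih hrest (by simp) (gs ++ [pvEnc cur ++ f]) none
        simpa [pvEnc, pvFragBal_nil] using this
      · have hstep : pvStepA (gs.map pvStrip, pvFragBal 0 (pvEnc cur ++ f), pvEnc cur ++ f) ','
            = (gs.map pvStrip, pvFragBal 0 (pvEnc cur ++ f), (pvEnc cur ++ f) ++ [',']) := by
          simp only [pvStepA]
          rw [if_neg (by simp), if_neg (by simp), if_neg (by simp [hz])]
        rw [if_neg hz, hstep]
        have := ih hrest (by simp) gs (some (pvEnc cur ++ f))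
        rw [pvFragBal_enc _ _ rfl] at this
        simpa [pvEnc] using this

-- fragments of splitOn are comma-free
lemma pvSplitOn_no_comma (cs : List Char) : ∀ f ∈ cs.splitOn ',', ',' ∉ f := by
  induction cs with
  | nil => simp [List.splitOn, List.splitOnP_nil]
  | cons x xs ih =>
    intro f hf
    rw [List.splitOn, List.splitOnP_cons] at hf
    by_cases hx : x = ','
    · simp [hx] at hf
      rcases hf with h | h
      · simp [h]
      · exact ih f h
    · simp [hx] at hf
      obtain ⟨h, t, ht⟩ : ∃ h t, xs.splitOn ',' = h :: t := by
        rcases e : xs.splitOn ',' with _ | ⟨h, t⟩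
        · exact absurd e (List.splitOnP_ne_nil _ _)
        · exact ⟨h, t, rfl⟩
      rw [List.splitOn] at ht
      rw [ht] at hf
      simp at hf
      rcases hf with h1 | h1
      · subst h1
        intro hc
        rcases List.mem_cons.mp hc with hc | hc
        · exact hx hc.symm
        · exact ih h (by rw [List.splitOn, ht]; exact List.mem_cons_self) hc
      · exact ih f (by rw [List.splitOn, ht]; exact List.mem_cons_of_mem _ h1)

lemma pvGlue_intercalate (frags : List (List Char)) :
    pvGlue frags = [','].intercalate frags := by
  induction frags with
  | nil => simp [pvGlue, List.intercalate]
  | cons f rest ih =>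
    cases rest with
    | nil => simp [pvGlue, List.intercalate]
    | cons g r =>
      rw [pvGlue, ih]
      simp [List.intercalate]

lemma pvGlue_splitOn (cs : List Char) : pvGlue (cs.splitOn ',') = cs := by
  rw [pvGlue_intercalate, List.intercalate_splitOn]

-- ===== VERDICT (by name: the statement is the Claim_ definition above) =====
theorem split_generic_params_py_spec : Claim_equal_split_generic_params_py := by
  intro inner _
  show split_generic_params_py inner = split_generic_params_py_alt inner
  have h := pvMain (inner.toList.splitOn ',') (pvSplitOn_no_comma _)
    (List.splitOnP_ne_nil _ _) [] none
  rw [pvGlue_splitOn] at h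
  simpa [split_generic_params_py, split_generic_params_py_alt, pvFinA, pvFinB, pvEnc,
    pvFragBal_nil, pvStrip] using h
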